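-- pv_equiv track=rewrite | github.com/chipturner/advent-of-code-2021 | src/day17.py | y_candidates
-- ===== SOURCE A (Python) =====
-- def y_candidates(yv, min_y, max_y):
--     pos = 0
--     step = 0
--     while True:
--         step += 1
--         pos += yv
--         yv -= 1
--         if min_y <= pos <= max_y:
--             yield step
--         if pos < min_y:
--             return
-- ===== SOURCE B (Python) =====
-- def y_candidates(yv, min_y, max_y):
--     # phase 1: find the first step n at which the probe has fallen below min_y
--     n = 1
--     while yv * n - n * (n - 1) // 2 >= min_y:
--         n += 1
--     # phase 2: yield every earlier step whose position lies in the target band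
--     for step in range(1, n):
--         pos = yv * step - step * (step - 1) // 2
--         if min_y <= pos <= max_y:
--             yield step
-- ===== Notes on version B (the rewrite author's own statement) =====
-- stated objective: alternative
-- what changed: B replaces A's single simulation loop with mutable pos/yv accumulators by two stages: first a search loop that finds the terminal step n (first step whose closed-form position yv*n - n*(n-1)//2 drops below min_y), then a pass over range(1, n) that yields the steps whose closed-form position lies in the band.
import Mathlib
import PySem

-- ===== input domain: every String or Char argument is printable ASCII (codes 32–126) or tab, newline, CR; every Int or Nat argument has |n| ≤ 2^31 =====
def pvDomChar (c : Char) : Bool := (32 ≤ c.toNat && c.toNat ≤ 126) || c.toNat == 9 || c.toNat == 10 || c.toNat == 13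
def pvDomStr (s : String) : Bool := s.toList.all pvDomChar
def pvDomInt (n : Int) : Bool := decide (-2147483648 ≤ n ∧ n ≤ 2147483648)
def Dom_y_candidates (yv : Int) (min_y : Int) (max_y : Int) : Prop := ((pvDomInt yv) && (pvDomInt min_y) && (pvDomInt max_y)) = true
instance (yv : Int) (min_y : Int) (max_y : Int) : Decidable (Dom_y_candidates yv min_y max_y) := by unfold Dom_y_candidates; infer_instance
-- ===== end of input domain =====

-- B replaces A's single simulation loop (running pos/yv accumulators) by two stages: a search loop that finds the terminal step n (first step whose closed-form position drops below min_y), then a pass over range(1, n) collecting in-band steps (objective: alternative).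
-- A's generator is ported as a fueled recursion returning the full yielded list; the correspondence is proved for every fuel value.


-- fuel bound shared by both ports; large enough that each loop reaches its own exit on every Dom input
def pvFuel : Nat := 17179869184

-- ===== PORT A =====
-- A's while-loop: state (pos, yv, step); step += 1; pos += yv; yv -= 1; yield step if in range; return if pos < min_y
def yLoopA (fuel : Nat) (acc : List Int) (pos yv step min_y max_y : Int) : List Int :=
  match fuel with
  | 0 => acc
  | f + 1 =>
    let step' := step + 1
    let pos' := pos + yv
    let yv' := yv - 1
    let acc' := if min_y ≤ pos' ∧ pos' ≤ max_y then acc ++ [step'] else acc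
    if pos' < min_y then acc'
    else yLoopA f acc' pos' yv' step' min_y max_y

def y_candidates (yv : Int) (min_y : Int) (max_y : Int) : List Int :=
  yLoopA pvFuel [] 0 yv 0 min_y max_y

-- ===== PORT B =====
-- phase 1 of B: while yv*n - n*(n-1)//2 >= min_y: n += 1
def findStop (fuel : Nat) (yv min_y n : Int) : Int :=
  match fuel with
  | 0 => n
  | f + 1 =>
    if min_y ≤ yv * n - PySem.Int.floordiv (n * (n - 1)) 2 then findStop f yv min_y (n + 1)
    else n

def y_candidates_alt (yv : Int) (min_y : Int) (max_y : Int) : List Int :=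
  let n := findStop pvFuel yv min_y 1
  -- phase 2 of B: for step in range(1, n): yield step if the closed-form position is in band
  (PySem.List.pyRange 1 n 1).foldl (fun acc step =>
    let pos := yv * step - PySem.Int.floordiv (step * (step - 1)) 2
    if min_y ≤ pos ∧ pos ≤ max_y then acc ++ [step] else acc) []

-- ===== PRECONDITION & SPEC =====
def Spec_y_candidates (yv : Int) (min_y : Int) (max_y : Int) (out : List Int) : Prop := out = y_candidates_alt yv min_y max_y
instance (yv : Int) (min_y : Int) (max_y : Int) (out : List Int) : Decidable (Spec_y_candidates yv min_y max_y out) := by unfold Spec_y_candidates; infer_instance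

-- ===== CLAIM (what is proved, stated in full; the proofs are below) =====
def Claim_equal_y_candidates : Prop := ∀ (yv : Int) (min_y : Int) (max_y : Int), Dom_y_candidates yv min_y max_y → Spec_y_candidates yv min_y max_y (y_candidates yv min_y max_y)

-- ===== LEMMAS AND PROOFS =====

-- the closed form: position after k steps with initial velocity yv0
def pvCF (yv0 k : Int) : Int := yv0 * k - PySem.Int.floordiv (k * (k - 1)) 2

lemma pvCF_succ (yv0 k : Int) : pvCF yv0 (k + 1) = pvCF yv0 k + (yv0 - k) := by
  obtain ⟨m, hm⟩ : ∃ m, k * (k - 1) = 2 * m := by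
    rcases Int.even_or_odd k with ⟨t, ht⟩ | ⟨t, ht⟩
    · exact ⟨t * (k - 1), by rw [ht]; ring⟩
    · exact ⟨k * t, by rw [ht]; ring⟩
  have hm' : (k + 1) * ((k + 1) - 1) = 2 * (m + k) := by rw [show (k+1)*((k+1)-1) = k*(k-1) + 2*k by ring, hm]; ring
  unfold pvCF
  rw [hm, hm', PySem.Int.floordiv, PySem.Int.floordiv,
      Int.mul_fdiv_cancel_left _ (by norm_num : (2:Int) ≠ 0),
      Int.mul_fdiv_cancel_left _ (by norm_num : (2:Int) ≠ 0)]
  ring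

lemma findStop_ge (fuel : Nat) (yv min_y : Int) : ∀ n, n ≤ findStop fuel yv min_y n := by
  induction fuel with
  | zero => intro n; simp [findStop]
  | succ f ih =>
    intro n
    unfold findStop
    split
    · exact le_trans (by omega) (ih (n + 1))
    · exact le_refl n

-- A's loop, started at step k with the correct state, collects exactly the in-band steps of range(k+1, findStop fuel (k+1))
lemma yLoopA_eq_filter (yv0 min_y max_y : Int) : ∀ (fuel : Nat) (k : Int) (acc : List Int),
    yLoopA fuel acc (pvCF yv0 k) (yv0 - k) k min_y max_y
      = acc ++ (PySem.List.pyRange (k + 1) (findStop fuel yv0 min_y (k + 1)) 1).filter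
          (fun s => decide (min_y ≤ pvCF yv0 s ∧ pvCF yv0 s ≤ max_y)) := by
  intro fuel
  induction fuel with
  | zero =>
    intro k acc
    simp [yLoopA, findStop, PySem.List.pyRange_one_eq_nil (le_refl (k + 1))]
  | succ f ih =>
    intro k acc
    have hpos : pvCF yv0 k + (yv0 - k) = pvCF yv0 (k + 1) := (pvCF_succ yv0 k).symm
    have hcf : yv0 * (k + 1) - PySem.Int.floordiv ((k + 1) * ((k + 1) - 1)) 2 = pvCF yv0 (k + 1) := rfl
    simp only [yLoopA, findStop, hpos, hcf]
    by_cases hlt : pvCF yv0 (k + 1) < min_y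
    · have hnotP : ¬ (min_y ≤ pvCF yv0 (k + 1) ∧ pvCF yv0 (k + 1) ≤ max_y) := fun h => absurd h.1 (not_le.mpr hlt)
      rw [if_neg hnotP, if_pos hlt, if_neg (not_le.mpr hlt),
          PySem.List.pyRange_one_eq_nil (le_refl (k + 1))]
      simp
    · have hge : min_y ≤ pvCF yv0 (k + 1) := not_lt.mp hlt
      rw [if_neg hlt, if_pos hge]
      have hstop : k + 1 < findStop f yv0 min_y (k + 1 + 1) :=
        lt_of_lt_of_le (show (k:Int) + 1 < k + 1 + 1 by omega) (findStop_ge f yv0 min_y (k + 1 + 1))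
      have hyv : yv0 - k - 1 = yv0 - (k + 1) := by ring
      rw [hyv, ih (k + 1)]
      rw [PySem.List.pyRange_one_cons hstop, List.filter_cons]
      by_cases hP : min_y ≤ pvCF yv0 (k + 1) ∧ pvCF yv0 (k + 1) ≤ max_y
      · simp [hP]
      · simp [hP]

-- ===== VERDICT (by name: the statement is the Claim_ definition above) =====
theorem y_candidates_spec : Claim_equal_y_candidates := by
  intro yv min_y max_y _
  unfold Spec_y_candidates y_candidates y_candidates_alt
  have h0 : pvCF yv 0 = 0 := by unfold pvCF; simp [PySem.Int.floordiv]
  have h := yLoopA_eq_filter yv min_y max_y pvFuel 0 []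
  rw [h0, show yv - 0 = yv by ring, show (0:Int) + 1 = 1 by ring] at h
  rw [h]
  simp only [List.nil_append, pvCF]
  symm
  rw [PySem.List.foldl_append_ite_eq_filter]
  simp
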